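-- pv_equiv track=rewrite | github.com/bashbash96/google-auto-complete-text | string_utils.py | get_text_suffixes
-- ===== SOURCE A (Python) =====
-- def get_text_suffixes(text):
--     """
--     Function to get all the suffixes substrings of a given string
--     :param text: the original string
--     :return: list of all suffixes
--     """
--     # if text[-1] == '\n':
--     #     text = text[:-1]
--     words = text.split(' ')
--     suffixes = []
--     for i in range(len(words)):
--         if words[i] in words[0:i]:
--             continue
--         sentence = ' '.join(words[i:])
--         suffixes.append(sentence)
--
--     return suffixes
-- ===== SOURCE B (Python) =====
-- def get_text_suffixes(text):
--     """Suffix sentences starting at each word's first occurrence, built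
--     right-to-left with a running accumulator instead of repeated joins."""
--     words = text.split(' ')
--     first = {}
--     for i, w in enumerate(words):
--         if w not in first:
--             first[w] = i
--     res = []
--     cur = ''
--     for i in range(len(words) - 1, -1, -1):
--         if i == len(words) - 1:
--             cur = words[i]
--         else:
--             cur = words[i] + ' ' + cur
--         if first[words[i]] == i:
--             res.insert(0, cur)
--     return res
-- ===== Notes on version B (the rewrite author's own statement) =====
-- stated objective: alternative
-- what changed: Replaces the per-index slice-membership test and the repeated join of each tail slice by a first-occurrence index table built in one pass plus a single right-to-left pass that extends a running suffix accumulator, recording it when the index is the word's first occurrence.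
import Mathlib
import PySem

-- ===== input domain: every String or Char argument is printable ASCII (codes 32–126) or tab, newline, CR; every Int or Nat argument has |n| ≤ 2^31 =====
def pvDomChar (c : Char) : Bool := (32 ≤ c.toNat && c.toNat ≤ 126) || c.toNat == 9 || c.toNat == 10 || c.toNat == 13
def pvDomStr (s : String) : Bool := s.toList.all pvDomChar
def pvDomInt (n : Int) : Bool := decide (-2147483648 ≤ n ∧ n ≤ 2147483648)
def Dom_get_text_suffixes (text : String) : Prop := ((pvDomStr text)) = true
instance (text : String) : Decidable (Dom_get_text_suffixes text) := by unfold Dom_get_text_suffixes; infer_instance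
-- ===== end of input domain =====

-- B replaces A's per-index slice-membership test and repeated ' '.join(words[i:]) by a
-- first-occurrence index table plus one right-to-left pass with a running suffix accumulator.

-- ===== PORT A =====
-- text.split(' ') is PySem.Str.split?; the separator " " is nonempty, so split? is always
-- some and the getD default is never taken. words[0:i] with 0 ≤ i is exactly List.take i;
-- words[i:] is List.drop i; i ranges over range(len(words)), so words[i] is words.getD i "".
def get_text_suffixes (text : String) : List String :=
  let words := (PySem.Str.split? text " ").getD []
  (List.range words.length).foldl
    (fun suffixes i =>
      if words.getD i "" ∈ words.take i then
        suffixes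
      else
        suffixes ++ [PySem.Str.join " " (words.drop i)])
    []

-- ===== PORT B =====
-- first-occurrence index of every word: for i, w in enumerate(words): if w not in first: first[w] = i
def altFirst (words : List String) : PySem.Dict String Int :=
  (PySem.List.enumerate words 0).foldl
    (fun d p => if d.contains p.2 then d else d.insert p.2 p.1)
    PySem.Dict.empty

-- the downward loop: argument k means indices k-1, k-2, …, 0 are still to be processed
-- (Python's `for i in range(len(words)-1, -1, -1)`); res.insert(0, cur) is cur :: res.
def altLoop (words : List String) (first : PySem.Dict String Int) :
    Nat → String → List String → List String
  | 0, _, res => res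
  | k + 1, cur, res =>
    let w := words.getD k ""
    let cur' := if k = words.length - 1 then w else w ++ " " ++ cur
    let res' := if first.getD w (-1) = (k : Int) then cur' :: res else res
    altLoop words first k cur' res'

def get_text_suffixes_alt (text : String) : List String :=
  let words := (PySem.Str.split? text " ").getD []
  altLoop words (altFirst words) words.length "" []

-- ===== PRECONDITION & SPEC =====
def Spec_get_text_suffixes (text : String) (out : List String) : Prop := out = get_text_suffixes_alt text
instance (text : String) (out : List String) : Decidable (Spec_get_text_suffixes text out) := by unfold Spec_get_text_suffixes; infer_instance

-- ===== CLAIM (what is proved, stated in full; the proofs are below) =====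
def Claim_equal_get_text_suffixes : Prop := ∀ (text : String), Dom_get_text_suffixes text → Spec_get_text_suffixes text (get_text_suffixes text)

-- ===== LEMMAS AND PROOFS =====

-- the suffix sentence starting at index k
def suffixAt (words : List String) (k : Nat) : String :=
  PySem.Str.join " " (words.drop k)

-- A's fold restricted to the first k indices
def aFold (words : List String) (k : Nat) : List String :=
  (List.range k).foldl
    (fun suffixes i =>
      if words.getD i "" ∈ words.take i then
        suffixes
      else
        suffixes ++ [suffixAt words i])
    []

lemma join_space_singleton (w : String) : PySem.Str.join " " [w] = w := by
  apply String.toList_inj.mp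
  rw [PySem.Str.toList_join]
  exact PySem.Chars.join_singleton ..

lemma join_space_cons (w b : String) (rest : List String) :
    PySem.Str.join " " (w :: b :: rest) = w ++ " " ++ PySem.Str.join " " (b :: rest) := by
  apply String.toList_inj.mp
  rw [PySem.Str.toList_join, String.toList_append, String.toList_append, PySem.Str.toList_join]
  exact PySem.Chars.join_cons_cons ..

-- B's accumulator update computes exactly A's ' '.join(words[k:])
lemma suffixAt_eq (words : List String) (k : Nat) (hk : k < words.length) :
    suffixAt words k =
      if k = words.length - 1 then words.getD k ""
      else words.getD k "" ++ " " ++ suffixAt words (k + 1) := by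
  unfold suffixAt
  rw [List.drop_eq_getElem_cons hk, List.getD_eq_getElem words "" hk]
  by_cases hlast : k = words.length - 1
  · have hdrop : words.drop (k + 1) = [] := by
      apply List.drop_eq_nil_of_le; omega
    rw [if_pos hlast, hdrop, join_space_singleton]
  · have hne : words.drop (k + 1) ≠ [] := by
      intro h
      have := List.drop_eq_nil_iff.mp h
      omega
    obtain ⟨b, rest, hbr⟩ := List.exists_cons_of_ne_nil hne
    rw [if_neg hlast, hbr, join_space_cons]

-- characterisation of the first-occurrence fold, for an arbitrary start and seed dict
lemma altFirst_fold_get? (l : List String) (s : Int) (d : PySem.Dict String Int) (w : String) :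
    ((PySem.List.enumerate l s).foldl
        (fun d p => if d.contains p.2 then d else d.insert p.2 p.1) d).get? w
      = (d.get? w).or (Option.map (fun j : Nat => s + (j : Int)) (PySem.List.index? l w)) := by
  induction l generalizing s d with
  | nil =>
    rw [PySem.List.enumerate_nil]
    simp only [List.foldl_nil]
    rw [PySem.List.index?_eq_idxOf?]
    simp
  | cons x l ih =>
    rw [PySem.List.enumerate_cons]
    simp only [List.foldl_cons]
    by_cases hwx : w = x
    · subst hwx
      rw [PySem.List.index?_cons_self]
      by_cases hc : d.contains w
      · rw [if_pos hc, ih]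
        have hv : ∃ v, d.get? w = some v := by
          rcases h : d.get? w with _ | v
          · exact absurd ((PySem.Dict.get?_eq_none_iff_contains d w).mp h) (by simp [hc])
          · exact ⟨v, rfl⟩
        obtain ⟨v, hv⟩ := hv
        simp [hv]
      · rw [if_neg hc, ih]
        have hins : (d.insert w s).get? w = some s := by
          rw [PySem.Dict.get?_insert]; simp
        have hdx : d.get? w = none :=
          (PySem.Dict.get?_eq_none_iff_contains d w).mpr (by simpa using hc)
        simp [hins, hdx]
    · have hxw : x ≠ w := fun h => hwx h.symm
      rw [PySem.List.index?_cons_of_ne l hxw]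
      have htail :
          Option.map (fun j : Nat => s + 1 + (j : Int)) (PySem.List.index? l w)
            = Option.map (fun j : Nat => s + (j : Int))
                (Option.map (fun j => j + 1) (PySem.List.index? l w)) := by
        rcases h : PySem.List.index? l w with _ | j
        · rfl
        · simp only [Option.map_some]
          congr 1
          push_cast
          ring
      by_cases hc : d.contains x
      · rw [if_pos hc, ih, htail]
      · rw [if_neg hc, ih]
        have hins : (d.insert x s).get? w = d.get? w := by
          rw [PySem.Dict.get?_insert]; simp [hwx]
        rw [hins, htail]

-- the recorded condition of B is exactly the negation of A's skip condition
lemma altFirst_getD_iff (words : List String) (k : Nat) (hk : k < words.length) :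
    ((altFirst words).getD (words.getD k "") (-1) = (k : Int))
      ↔ words.getD k "" ∉ words.take k := by
  set w := words.getD k "" with hw
  have hwk : words[k] = w := by rw [hw, List.getD_eq_getElem words "" hk]
  have hmem : w ∈ words := hwk ▸ List.getElem_mem hk
  have hidx : ∃ j, PySem.List.index? words w = some j := by
    rw [PySem.List.index?_eq_idxOf?]
    rcases h : List.idxOf? w words with _ | j
    · exact absurd (List.idxOf?_eq_none_iff.mp h) (by simp [hmem])
    · exact ⟨j, rfl⟩
  obtain ⟨j, hj⟩ := hidx
  obtain ⟨pre, suf, hps, hlen, hnpre⟩ := (PySem.List.index?_eq_some_iff ..).mp hj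
  have hget : (altFirst words).get? w = some (j : Int) := by
    unfold altFirst
    rw [altFirst_fold_get? words 0 PySem.Dict.empty w, PySem.Dict.get?_empty, hj]
    simp
  have hgetD : (altFirst words).getD w (-1) = (j : Int) := by
    rw [PySem.Dict.getD_eq_get?_getD, hget]; rfl
  -- j ≤ k: otherwise words[k] would lie inside pre, contradicting w ∉ pre
  have hjk : j ≤ k := by
    by_contra hgt
    have hkpre : k < pre.length := by omega
    have h1 : words[k] = pre[k] := by
      rw [List.getElem_of_eq hps hk]; exact List.getElem_append_left hkpre
    have h2 : pre[k] = w := h1.symm.trans hwk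
    exact hnpre (h2 ▸ List.getElem_mem hkpre)
  rw [hgetD]
  constructor
  · -- j = k → w ∉ take k : take k is then exactly pre
    intro hjek hmemtake
    have hjk' : j = k := by exact_mod_cast hjek
    have htake : words.take k = pre := by
      rw [hps, List.take_append]
      have h0 : k - pre.length = 0 := by omega
      rw [h0]
      simp
      omega
    exact hnpre (htake ▸ hmemtake)
  · -- w ∉ take k → j = k (since j ≤ k, and j < k would put w into take k)
    intro hnt
    by_contra hne
    have hjlt : j < k := by
      rcases lt_or_eq_of_le hjk with h | h
      · exact h
      · exact absurd (by exact_mod_cast h : (j : Int) = (k : Int)) hne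
    have : w ∈ words.take k := by
      rw [hps, List.take_append]
      have h0 : k - pre.length ≠ 0 := by omega
      rcases Nat.exists_eq_succ_of_ne_zero h0 with ⟨m, hm⟩
      rw [hm]
      simp
    exact hnt this

lemma aFold_succ (words : List String) (k : Nat) :
    aFold words (k + 1) =
      if words.getD k "" ∈ words.take k then aFold words k
      else aFold words k ++ [suffixAt words k] := by
  unfold aFold
  rw [List.range_succ, List.foldl_append]
  simp only [List.foldl_cons, List.foldl_nil]

-- loop invariant: with k indices left and a correct accumulator, B's loop produces
-- A's fold over the first k indices, prepended to res
lemma altLoop_eq (words : List String) (k : Nat) (hk : k ≤ words.length) :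
    ∀ (cur : String) (res : List String), (k < words.length → cur = suffixAt words k) →
      altLoop words (altFirst words) k cur res = aFold words k ++ res := by
  induction k with
  | zero => intro cur res _; simp [altLoop, aFold]
  | succ k ih =>
    intro cur res hcur
    have hklt : k < words.length := by omega
    simp only [altLoop]
    have hcur' :
        (if k = words.length - 1 then words.getD k ""
          else words.getD k "" ++ " " ++ cur) = suffixAt words k := by
      rw [suffixAt_eq words k hklt]
      by_cases hlast : k = words.length - 1
      · simp only [if_pos hlast]
      · have hk1 : k + 1 < words.length := by omega
        simp only [if_neg hlast]
        rw [hcur hk1]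
    rw [hcur']
    rw [ih (by omega) (suffixAt words k) _ (fun _ => rfl)]
    rw [aFold_succ]
    by_cases hmem : words.getD k "" ∈ words.take k
    · rw [if_pos hmem,
        if_neg (fun h => ((altFirst_getD_iff words k hklt).mp h) hmem)]
    · rw [if_neg hmem, if_pos ((altFirst_getD_iff words k hklt).mpr hmem)]
      simp

-- both ports compute the same list for any word list
lemma main_eq (ws : List String) :
    (List.range ws.length).foldl
        (fun suffixes i =>
          if ws.getD i "" ∈ ws.take i then
            suffixes
          else
            suffixes ++ [PySem.Str.join " " (ws.drop i)])
        []
      = altLoop ws (altFirst ws) ws.length "" [] := by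
  rw [altLoop_eq ws ws.length le_rfl "" [] (fun h => absurd h (lt_irrefl _))]
  unfold aFold suffixAt
  simp

-- ===== VERDICT (by name: the statement is the Claim_ definition above) =====
theorem get_text_suffixes_spec : Claim_equal_get_text_suffixes := by
  intro text _
  unfold Spec_get_text_suffixes get_text_suffixes get_text_suffixes_alt
  exact main_eq ((PySem.Str.split? text " ").getD [])
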